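-- pv_equiv track=rewrite | github.com/neuro-galaxy/brainsets | brainsets_pipelines/schalk_wolpaw_physionet_2009/pipeline.py | get_num_groups
-- ===== SOURCE A (Python) =====
-- def get_num_groups(num_channels: int):
--     """Returns the number of groups based on the number of channels."""
--     num_groups = list(range(1, min(num_channels, 16) + 1))
--
--     if num_channels > 16:
--         init = 1
--         while num_channels // init > 16:
--             num_groups.append(num_channels // init)
--             init += 1
--
--     num_groups.sort()
--     return num_groups
-- ===== SOURCE B (Python) =====
-- def get_num_groups(num_channels: int):
--     """Returns the number of groups based on the number of channels."""
--     groups = list(range(1, min(num_channels, 16) + 1))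
--     # Large groups by quotient-block (hyperbola) decomposition: all divisors i in the
--     # block (num_channels//(q+1), i0] share the quotient q = num_channels//i0, so emit
--     # q once with its exact multiplicity and jump straight to the next block.  Only
--     # O(sqrt(num_channels)) divisions are performed and the blocks come out in
--     # ascending quotient order, so no sort is needed.
--     i = num_channels // 17
--     while i > 0:
--         q = num_channels // i
--         j = num_channels // (q + 1)
--         groups.extend([q] * (i - j))
--         i = j
--     return groups
-- ===== Notes on version B (the rewrite author's own statement) =====
-- stated objective: faster
-- what changed: B replaces the divisor-by-divisor while-loop plus final sort with a quotient-block (hyperbola) decomposition: it jumps from block to block of divisors sharing the same quotient, emitting each quotient with its multiplicity via list replication, doing O(sqrt(n)) divisions instead of O(n/17) and no sort since blocks arrive in ascending quotient order.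
import Mathlib
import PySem

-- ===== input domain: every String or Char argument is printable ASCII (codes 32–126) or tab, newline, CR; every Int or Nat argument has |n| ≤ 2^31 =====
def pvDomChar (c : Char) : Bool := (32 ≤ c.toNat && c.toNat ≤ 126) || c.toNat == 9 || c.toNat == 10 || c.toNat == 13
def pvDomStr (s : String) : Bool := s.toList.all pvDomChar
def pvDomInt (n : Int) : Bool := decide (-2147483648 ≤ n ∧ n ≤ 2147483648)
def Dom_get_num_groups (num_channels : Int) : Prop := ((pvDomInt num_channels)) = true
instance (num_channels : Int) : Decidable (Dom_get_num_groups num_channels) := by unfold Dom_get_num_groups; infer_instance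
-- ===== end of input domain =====

-- B replaces A's divisor-by-divisor loop plus final sort by a quotient-block (hyperbola)
-- decomposition emitting each quotient with its multiplicity in ascending order; objective: faster.

-- ===== PORT A =====
-- the while-loop: `init` is represented as i+1 (Python's init is 1, 2, 3, …)
def get_num_groups_aLoop (n : Int) (i : Nat) : List Int :=
  if h : 16 < PySem.Int.floordiv n ((i : Int) + 1) then
    PySem.Int.floordiv n ((i : Int) + 1) :: get_num_groups_aLoop n (i + 1)
  else []
termination_by n.toNat - i
decreasing_by
  have hb : (0 : Int) < (i : Int) + 1 := by positivity
  have h17 : (17 : Int) * ((i : Int) + 1) ≤ n :=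
    (PySem.Int.le_floordiv_iff_mul_le hb).mp (by omega)
  omega

def get_num_groups (num_channels : Int) : List Int :=
  -- num_groups = list(range(1, min(num_channels, 16) + 1))
  -- if num_channels > 16: while num_channels // init > 16: append; init += 1
  -- num_groups.sort()
  PySem.List.sorted
    (PySem.List.pyRange 1 (min num_channels 16 + 1) 1 ++
      (if 16 < num_channels then get_num_groups_aLoop num_channels 0 else []))
    (fun x => x) false

-- ===== PORT B =====
-- `while i > 0: q = n//i; j = n//(q+1); groups += [q]*(i-j); i = j`
-- fuel makes the recursion total on pathological states the Python loop never enters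
-- (i starts at n//17, so the loop only runs with n ≥ 17, where i strictly decreases);
-- fuel = the initial i bounds the iteration count exactly there.
def get_num_groups_bLoop : Nat → Int → Int → List Int
  | 0, _, _ => []
  | fuel + 1, n, i =>
    if 0 < i then
      List.replicate
          (i - PySem.Int.floordiv n (PySem.Int.floordiv n i + 1)).toNat
          (PySem.Int.floordiv n i) ++
        get_num_groups_bLoop fuel n (PySem.Int.floordiv n (PySem.Int.floordiv n i + 1))
    else []

def get_num_groups_alt (num_channels : Int) : List Int :=
  PySem.List.pyRange 1 (min num_channels 16 + 1) 1 ++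
    get_num_groups_bLoop (PySem.Int.floordiv num_channels 17).toNat num_channels
      (PySem.Int.floordiv num_channels 17)

-- ===== PRECONDITION & SPEC =====
def Spec_get_num_groups (num_channels : Int) (out : List Int) : Prop := out = get_num_groups_alt num_channels
instance (num_channels : Int) (out : List Int) : Decidable (Spec_get_num_groups num_channels out) := by unfold Spec_get_num_groups; infer_instance

-- ===== CLAIM (what is proved, stated in full; the proofs are below) =====
def Claim_equal_get_num_groups : Prop := ∀ (num_channels : Int), Dom_get_num_groups num_channels → Spec_get_num_groups num_channels (get_num_groups num_channels)

-- ===== LEMMAS AND PROOFS =====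

-- the while-loop starting at init = i+1 produces exactly the quotients for divisors i+1 .. n//17
theorem pv_loop_eq (n : Int) (i : Nat) :
    get_num_groups_aLoop n i =
      (PySem.List.pyRange ((i : Int) + 1) (PySem.Int.floordiv n 17 + 1) 1).map
        (fun j => PySem.Int.floordiv n j) := by
  fun_induction get_num_groups_aLoop n i with
  | case1 i h ih =>
    have hb : (0 : Int) < (i : Int) + 1 := by positivity
    have h17 : (17 : Int) * ((i : Int) + 1) ≤ n :=
      (PySem.Int.le_floordiv_iff_mul_le hb).mp (by omega)
    have hKi : (i : Int) + 1 ≤ PySem.Int.floordiv n 17 :=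
      (PySem.Int.le_floordiv_iff_mul_le (by norm_num)).mpr (by linarith)
    rw [PySem.List.pyRange_one_cons (by omega)]
    push_cast at ih
    simp [ih]
  | case2 i h =>
    have hb : (0 : Int) < (i : Int) + 1 := by positivity
    have hlt : n < 17 * ((i : Int) + 1) :=
      (PySem.Int.floordiv_lt_iff_lt_mul hb).mp (by omega)
    have hKi : PySem.Int.floordiv n 17 < (i : Int) + 1 :=
      (PySem.Int.floordiv_lt_iff_lt_mul (by norm_num)).mpr (by linarith)
    rw [PySem.List.pyRange_one_eq_nil (by omega)]
    simp

theorem pv_loop0 (n : Int) :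
    get_num_groups_aLoop n 0 =
      (PySem.List.pyRange 1 (PySem.Int.floordiv n 17 + 1) 1).map
        (fun j => PySem.Int.floordiv n j) := by
  simpa using pv_loop_eq n 0

theorem pv_div_antitone (n a b : Int) (hn : 0 ≤ n) (ha : 0 < a) (hab : a ≤ b) :
    PySem.Int.floordiv n b ≤ PySem.Int.floordiv n a := by
  have hb : (0 : Int) < b := lt_of_lt_of_le ha hab
  have h1 : PySem.Int.floordiv n b * b ≤ n := (PySem.Int.le_floordiv_iff_mul_le hb).mp le_rfl
  have h0 : 0 ≤ PySem.Int.floordiv n b :=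
    (PySem.Int.le_floordiv_iff_mul_le hb).mpr (by simpa using hn)
  exact (PySem.Int.le_floordiv_iff_mul_le ha).mpr (le_trans (by nlinarith) h1)

theorem pv_big_ge (n j : Int) (hj : 1 ≤ j) (hjK : j ≤ PySem.Int.floordiv n 17) :
    (17 : Int) ≤ PySem.Int.floordiv n j := by
  have h17 : j * 17 ≤ n := (PySem.Int.le_floordiv_iff_mul_le (by norm_num)).mp hjK
  exact (PySem.Int.le_floordiv_iff_mul_le (by omega)).mpr (by nlinarith)

-- B's block loop, for nonnegative n and enough fuel, emits exactly the quotients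
-- for divisors i, i-1, …, 1 (each block is constant, so replication = pointwise map)
theorem pv_bloop_eq (n : Int) (hn : 0 ≤ n) :
    ∀ (fuel : Nat) (i : Int), 0 ≤ i → i.toNat ≤ fuel →
      get_num_groups_bLoop fuel n i =
        (PySem.List.pyRange i 0 (-1)).map (fun j => PySem.Int.floordiv n j) := by
  intro fuel
  induction fuel with
  | zero =>
    intro i h0 hf
    have : i = 0 := by omega
    subst this
    rw [PySem.List.pyRange_neg_one_eq_nil (by omega)]
    simp [get_num_groups_bLoop]
  | succ f ih =>
    intro i h0 hf
    by_cases hi : 0 < i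
    · have hq0 : 0 ≤ PySem.Int.floordiv n i :=
        (PySem.Int.le_floordiv_iff_mul_le hi).mpr (by simpa using hn)
      set q := PySem.Int.floordiv n i with hq
      have hq1 : (0 : Int) < q + 1 := by omega
      set j := PySem.Int.floordiv n (q + 1) with hj
      have hj0 : 0 ≤ j := (PySem.Int.le_floordiv_iff_mul_le hq1).mpr (by simpa using hn)
      have hji : j < i := by
        have hlt : n < (q + 1) * i := by
          have := (PySem.Int.floordiv_lt_iff_lt_mul hi).mp (show q < q + 1 by omega)
          linarith [this]
        exact (PySem.Int.floordiv_lt_iff_lt_mul hq1).mpr (by linarith)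
      -- every divisor in the block (j, i] has quotient q
      have hblock : ∀ x : Int, j < x → x ≤ i → PySem.Int.floordiv n x = q := by
        intro x hx1 hx2
        have hx0 : 0 < x := by omega
        have hge : q ≤ PySem.Int.floordiv n x := pv_div_antitone n x i hn hx0 hx2
        have hle : PySem.Int.floordiv n x < q + 1 := by
          have hnlt : n < (q + 1) * x := by
            have := (PySem.Int.floordiv_lt_iff_lt_mul hq1).mp (show j < x by omega)
            nlinarith
          exact (PySem.Int.floordiv_lt_iff_lt_mul hx0).mpr hnlt
        omega
      have hrec := ih j hj0 (by omega)
      show (if 0 < i then _ else _) = _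
      rw [if_pos hi, ← hq, ← hj, hrec,
        PySem.List.pyRange_neg_one_eq_reverse i 0,
        PySem.List.pyRange_neg_one_eq_reverse j 0,
        (by norm_num : (0 : Int) + 1 = 1),
        PySem.List.pyRange_one_append 1 (j + 1) (i + 1) (by omega) (by omega),
        List.reverse_append, List.map_append, List.map_reverse, List.map_reverse]
      congr 1
      -- reverse of the block's map is (i-j) copies of q
      symm
      rw [List.eq_replicate_iff]
      constructor
      · rw [List.length_reverse, List.length_map, PySem.List.length_pyRange_one]
        omega
      · intro b hb
        rw [List.mem_reverse, List.mem_map] at hb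
        obtain ⟨x, hx, rfl⟩ := hb
        rw [PySem.List.mem_pyRange_one] at hx
        exact hblock x (by omega) (by omega)
    · have : i = 0 := by omega
      subst this
      rw [PySem.List.pyRange_neg_one_eq_nil (by omega)]
      simp [get_num_groups_bLoop]

-- ===== VERDICT (by name: the statement is the Claim_ definition above) =====
theorem get_num_groups_spec : Claim_equal_get_num_groups := by
  intro n _
  unfold Spec_get_num_groups get_num_groups get_num_groups_alt
  by_cases hn : 16 < n
  · have hK1 : (1 : Int) ≤ PySem.Int.floordiv n 17 :=
      (PySem.Int.le_floordiv_iff_mul_le (by norm_num)).mpr (by omega)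
    rw [pv_bloop_eq n (by omega) _ _ (by omega) le_rfl,
      if_pos hn, pv_loop0,
      PySem.List.pyRange_neg_one_eq_reverse,
      (by norm_num : (0 : Int) + 1 = 1),
      List.map_reverse]
    apply PySem.List.sorted_id_eq_of_perm_of_pairwise
    · exact List.Perm.append_left _ (List.reverse_perm _)
    · rw [List.pairwise_append]
      refine ⟨(PySem.List.pairwise_lt_pyRange_one 1 (min n 16 + 1)).imp le_of_lt, ?_, ?_⟩
      · rw [List.pairwise_reverse, List.pairwise_map]
        refine (PySem.List.pairwise_lt_pyRange_one 1 (PySem.Int.floordiv n 17 + 1)).imp_of_mem ?_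
        intro a b ha hb hab
        rw [PySem.List.mem_pyRange_one] at ha
        exact pv_div_antitone n a b (by omega) (by omega) (le_of_lt hab)
      · intro x hx y hy
        rw [PySem.List.mem_pyRange_one] at hx
        rw [List.mem_reverse, List.mem_map] at hy
        obtain ⟨j, hj, rfl⟩ := hy
        rw [PySem.List.mem_pyRange_one] at hj
        have := pv_big_ge n j (by omega) (by omega)
        omega
  · have hK0 : PySem.Int.floordiv n 17 ≤ 0 := by
      have : PySem.Int.floordiv n 17 < 1 :=
        (PySem.Int.floordiv_lt_iff_lt_mul (by norm_num)).mpr (by omega)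
      omega
    have hKz : (PySem.Int.floordiv n 17).toNat = 0 := by omega
    rw [if_neg hn, hKz]
    simp only [get_num_groups_bLoop, List.append_nil]
    apply PySem.List.sorted_eq_self_of_pairwise
    exact (PySem.List.pairwise_lt_pyRange_one 1 (min n 16 + 1)).imp le_of_lt
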